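-- pv_equiv track=rewrite | github.com/vuuduu/CMSC-201-Exam-2 | norgard.py | norgard
-- ===== SOURCE A (Python) =====
-- def norgard(n):
--     # BASE CASE
--     if n == 0:
--         return 0
--     else:
--         # Checks for even number
--         if n % 2 == 0:
--             return norgard((n // 2)) * (-1)
--         # Checks for odd number
--         else:
--             return norgard((n - 1) // 2) + 1
-- ===== SOURCE B (Python) =====
-- def norgard(n):
--     markers = []
--     while n != 0:
--         if n % 2 == 0:
--             markers.append('negate')
--             n //= 2
--         else:
--             markers.append('increment')
--             n = (n - 1) // 2
--     result = 0
--     for op in reversed(markers):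
--         if op == 'negate':
--             result = -result
--         else:
--             result = result + 1
--     return result
-- ===== Notes on version B (the rewrite author's own statement) =====
-- stated objective: alternative
-- what changed: Replaced the recursion with an explicit iterative loop that collects negate/increment markers bottom-up and then folds them in reversed order over an accumulator.
import Mathlib
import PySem

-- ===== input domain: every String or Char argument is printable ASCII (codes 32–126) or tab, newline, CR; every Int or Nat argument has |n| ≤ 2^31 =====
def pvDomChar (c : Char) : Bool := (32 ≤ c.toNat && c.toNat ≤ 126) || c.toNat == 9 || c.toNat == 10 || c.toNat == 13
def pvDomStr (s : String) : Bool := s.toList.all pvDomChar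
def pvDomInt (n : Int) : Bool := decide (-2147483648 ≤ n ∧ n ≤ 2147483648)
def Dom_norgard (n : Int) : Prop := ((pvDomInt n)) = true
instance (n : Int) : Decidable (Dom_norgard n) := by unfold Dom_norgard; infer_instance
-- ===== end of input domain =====

-- B restates A's recursion as an iterative marker-collecting loop plus a reversed fold (alternative decomposition, same cost).

-- ===== PORT A =====
-- fuel makes the recursion total in Lean; for 0 ≤ n the fuel n.toNat+1 always suffices (negative n diverges in Python and is excluded by Pre_)
def norgardFuel : Nat → Int → Int
  | 0, _ => 0
  | f + 1, n =>
    if n = 0 then 0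
    else if n % 2 == 0 then norgardFuel f (PySem.Int.floordiv n 2) * (-1)
    else norgardFuel f (PySem.Int.floordiv (n - 1) 2) + 1

def norgard (n : Int) : Int := norgardFuel (n.toNat + 1) n

-- ===== PORT B =====
-- the while-loop collecting markers (false = 'negate', true = 'increment'); fuel for totality as above
def norgardCollect : Nat → Int → List Bool → List Bool
  | 0, _, acc => acc
  | f + 1, n, acc =>
    if n = 0 then acc
    else if n % 2 == 0 then norgardCollect f (PySem.Int.floordiv n 2) (acc ++ [false])
    else norgardCollect f (PySem.Int.floordiv (n - 1) 2) (acc ++ [true])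

def norgardStep (r : Int) (op : Bool) : Int := if op = false then -r else r + 1

def norgard_alt (n : Int) : Int :=
  ((norgardCollect (n.toNat + 1) n []).reverse).foldl norgardStep 0

-- ===== PRECONDITION & SPEC =====
-- Pre_ excludes negative n, on which the Python A raises RecursionError (infinite recursion).
def Pre_norgard (n : Int) : Prop := 0 ≤ n
instance (n : Int) : Decidable (Pre_norgard n) := by unfold Pre_norgard; infer_instance
def pvWitness_norgard : Int := 6

def Spec_norgard (n : Int) (out : Int) : Prop := out = norgard_alt n
instance (n : Int) (out : Int) : Decidable (Spec_norgard n out) := by unfold Spec_norgard; infer_instance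

-- ===== CLAIM (what is proved, stated in full; the proofs are below) =====
def Claim_equal_norgard : Prop := ∀ (n : Int), Dom_norgard n → Pre_norgard n → Spec_norgard n (norgard n)

-- ===== LEMMAS AND PROOFS =====

-- the accumulator can be pulled out of the collecting loop
theorem norgardCollect_acc (f : Nat) : ∀ (n : Int) (acc : List Bool),
    norgardCollect f n acc = acc ++ norgardCollect f n [] := by
  induction f with
  | zero => intro n acc; simp [norgardCollect]
  | succ f ih =>
    intro n acc
    by_cases h0 : n = 0
    · simp [norgardCollect, h0]
    · by_cases h2 : n % 2 == 0
      · simp only [norgardCollect, if_neg h0, if_pos h2]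
        rw [List.nil_append, ih, ih (PySem.Int.floordiv n 2) [false]]
        simp
      · simp only [norgardCollect, if_neg h0, if_neg h2]
        rw [List.nil_append, ih, ih (PySem.Int.floordiv (n - 1) 2) [true]]
        simp

theorem floordiv_two_lt (n : Int) (h : 0 < n) : (PySem.Int.floordiv n 2).toNat < n.toNat := by
  have : PySem.Int.floordiv n 2 = n / 2 := by
    simp [PySem.Int.floordiv, Int.fdiv_eq_ediv]
  rw [this]
  omega

theorem floordiv_pred_two_lt (n : Int) (h : 0 < n) :
    (PySem.Int.floordiv (n - 1) 2).toNat < n.toNat := by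
  have : PySem.Int.floordiv (n - 1) 2 = (n - 1) / 2 := by
    simp [PySem.Int.floordiv, Int.fdiv_eq_ediv]
  rw [this]
  omega

theorem floordiv_two_nonneg (n : Int) (h : 0 ≤ n) : 0 ≤ PySem.Int.floordiv n 2 := by
  have : PySem.Int.floordiv n 2 = n / 2 := by
    simp [PySem.Int.floordiv, Int.fdiv_eq_ediv]
  omega

theorem floordiv_pred_two_nonneg (n : Int) (h : 0 < n) : 0 ≤ PySem.Int.floordiv (n - 1) 2 := by
  have : PySem.Int.floordiv (n - 1) 2 = (n - 1) / 2 := by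
    simp [PySem.Int.floordiv, Int.fdiv_eq_ediv]
  omega

-- the reversed fold of the collected markers computes exactly A's recursion
theorem collect_fold (f : Nat) : ∀ (n : Int), 0 ≤ n → n.toNat < f →
    ((norgardCollect f n []).reverse).foldl norgardStep 0 = norgardFuel f n := by
  induction f using Nat.strong_induction_on with
  | _ f ih =>
    intro n hn hf
    match f with
    | f' + 1 =>
      by_cases h0 : n = 0
      · simp [norgardCollect, norgardFuel, h0]
      · have hpos : 0 < n := lt_of_le_of_ne hn (Ne.symm h0)
        by_cases h2 : n % 2 == 0
        · simp only [norgardCollect, norgardFuel, if_neg h0, if_pos h2]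
          have hlt := floordiv_two_lt n hpos
          have hnn := floordiv_two_nonneg n hn
          have h1 := ih f' (by omega) (PySem.Int.floordiv n 2) hnn (by omega)
          rw [List.nil_append, norgardCollect_acc, List.reverse_append, List.foldl_append, h1]
          simp [norgardStep]
        · simp only [norgardCollect, norgardFuel, if_neg h0, if_neg h2]
          have hlt := floordiv_pred_two_lt n hpos
          have hnn := floordiv_pred_two_nonneg n hpos
          have h1 := ih f' (by omega) (PySem.Int.floordiv (n - 1) 2) hnn (by omega)
          rw [List.nil_append, norgardCollect_acc, List.reverse_append, List.foldl_append, h1]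
          simp [norgardStep]

-- ===== VERDICT (by name: the statement is the Claim_ definition above) =====
theorem norgard_spec : Claim_equal_norgard := by
  intro n _ hpre
  unfold Spec_norgard norgard norgard_alt
  exact (collect_fold (n.toNat + 1) n hpre (by omega)).symm
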